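-- pv_equiv track=rewrite | github.com/ALxxy123/code-scan-sec | url_scanner.py | is_git_url
-- ===== SOURCE A (Python) =====
-- def is_git_url(url: str) -> bool:
--     """
--     Check if URL is a Git repository.
--
--     Args:
--         url: URL to check
--
--     Returns:
--         bool: True if URL appears to be a Git repository
--     """
--     git_indicators = [
--         '.git',
--         'github.com',
--         'gitlab.com',
--         'bitbucket.org',
--         'gitea.',
--         'gogs.'
--     ]
--     return any(indicator in url.lower() for indicator in git_indicators)
-- ===== SOURCE B (Python) =====
-- def is_git_url(url: str) -> bool:
--     """Single left-to-right scan of the lowered URL: at each position test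
--     whether any git indicator starts there (multi-pattern prefix scan),
--     instead of one full substring search per indicator."""
--     indicators = ('.git', 'github.com', 'gitlab.com', 'bitbucket.org',
--                   'gitea.', 'gogs.')
--     s = url.lower()
--     for i in range(len(s)):
--         for ind in indicators:
--             if s.startswith(ind, i):
--                 return True
--     return False
-- ===== Notes on version B (the rewrite author's own statement) =====
-- stated objective: alternative
-- what changed: Replaces the per-indicator full substring searches (any(ind in url.lower() ...)) by one left-to-right scan of the lowered URL that tests at each position whether any indicator starts there (multi-pattern prefix scan).
import Mathlib
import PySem

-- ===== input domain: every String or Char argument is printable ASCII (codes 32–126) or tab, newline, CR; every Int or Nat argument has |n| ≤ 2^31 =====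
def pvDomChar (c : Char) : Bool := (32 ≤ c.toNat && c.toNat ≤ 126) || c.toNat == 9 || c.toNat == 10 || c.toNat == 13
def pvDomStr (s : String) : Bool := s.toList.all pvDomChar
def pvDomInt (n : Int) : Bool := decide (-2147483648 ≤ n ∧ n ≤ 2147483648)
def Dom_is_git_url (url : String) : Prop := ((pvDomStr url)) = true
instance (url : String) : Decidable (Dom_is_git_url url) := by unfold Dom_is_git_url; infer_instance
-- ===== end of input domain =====

-- ===== PORT A =====
-- every indicator is tested with a full substring search in the lowered url
def is_git_url (url : String) : Bool :=
  let git_indicators : List String :=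
    [".git", "github.com", "gitlab.com", "bitbucket.org", "gitea.", "gogs."]
  git_indicators.any (fun indicator => PySem.Str.isIn indicator (PySem.Str.lower url))

-- ===== PORT B =====
-- B: one left-to-right scan of the lowered url; at each position test whether
-- any indicator starts there (multi-pattern prefix scan).
def gitIndicatorsB : List (List Char) :=
  [".git".toList, "github.com".toList, "gitlab.com".toList, "bitbucket.org".toList,
   "gitea.".toList, "gogs.".toList]

def bScan (inds : List (List Char)) : List Char → Bool
  | [] => false
  | c :: rest =>
      inds.any (fun ind => PySem.Chars.startswith (c :: rest) ind) || bScan inds rest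

def is_git_url_alt (url : String) : Bool :=
  bScan gitIndicatorsB (PySem.Chars.lower url.toList)

-- ===== PRECONDITION & SPEC =====
def Spec_is_git_url (url : String) (out : Bool) : Prop := out = is_git_url_alt url
instance (url : String) (out : Bool) : Decidable (Spec_is_git_url url out) := by unfold Spec_is_git_url; infer_instance

-- ===== CLAIM (what is proved, stated in full; the proofs are below) =====
def Claim_equal_is_git_url : Prop := ∀ (url : String), Dom_is_git_url url → Spec_is_git_url url (is_git_url url)

-- ===== LEMMAS AND PROOFS =====

theorem bScan_eq_any_isIn (inds : List (List Char)) (h : ∀ ind ∈ inds, ind ≠ [])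
    (l : List Char) : bScan inds l = inds.any (fun ind => PySem.Chars.isIn ind l) := by
  induction l with
  | nil =>
      simp [bScan]
      intro ind hmem
      rw [PySem.Chars.isIn_eq_false_iff]
      intro hinf
      exact h ind hmem (List.eq_nil_of_infix_nil hinf)
  | cons c rest ih =>
      show (_ || bScan inds rest) = _
      rw [ih]
      apply Bool.eq_iff_iff.mpr
      simp only [Bool.or_eq_true, List.any_eq_true]
      constructor
      · rintro (⟨ind, hmem, hsw⟩ | ⟨ind, hmem, hin⟩)
        · refine ⟨ind, hmem, ?_⟩
          rw [PySem.Chars.isIn_iff_infix]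
          exact ((PySem.Chars.startswith_iff _ _).mp hsw).isInfix
        · refine ⟨ind, hmem, ?_⟩
          rw [PySem.Chars.isIn_iff_infix] at hin ⊢
          exact hin.trans (List.suffix_cons c rest).isInfix
      · rintro ⟨ind, hmem, hin⟩
        rw [PySem.Chars.isIn_iff_infix, List.infix_cons_iff] at hin
        rcases hin with hpre | hinf
        · exact Or.inl ⟨ind, hmem, (PySem.Chars.startswith_iff _ _).mpr hpre⟩
        · exact Or.inr ⟨ind, hmem, (PySem.Chars.isIn_iff_infix _ _).mpr hinf⟩

-- ===== VERDICT (by name: the statement is the Claim_ definition above) =====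
theorem is_git_url_spec : Claim_equal_is_git_url := by
  intro url _
  unfold Spec_is_git_url is_git_url is_git_url_alt
  rw [bScan_eq_any_isIn gitIndicatorsB (by decide)]
  simp [gitIndicatorsB, List.any, PySem.Str.isIn_eq, PySem.Str.toList_lower]
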